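-- pv_equiv track=rewrite | github.com/jteerlink/church-gpt | src/church_scraper/reformatter/formatter.py | format_notes_section
-- ===== SOURCE A (Python) =====
-- def format_notes_section(notes_content: str) -> str:
--     """Format notes section consistently."""
--     if not notes_content:
--         return ""
--
--     # Ensure it starts with "Notes" header
--     if not notes_content.strip().startswith('Notes'):
--         notes_content = f"Notes\n{notes_content}"
--
--     # Clean up formatting
--     lines = notes_content.split('\n')
--     cleaned_lines = []
--
--     for line in lines:
--         # Remove excessive indentation
--         line = line.strip()
--         if line:
--             cleaned_lines.append(line)
--         elif cleaned_lines and cleaned_lines[-1]:  # Keep single blank lines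
--             cleaned_lines.append('')
--
--     return '\n'.join(cleaned_lines)
-- ===== SOURCE B (Python) =====
-- def format_notes_section(notes_content: str) -> str:
--     """Format notes section consistently."""
--     if not notes_content:
--         return ""
--
--     if not notes_content.strip().startswith('Notes'):
--         notes_content = f"Notes\n{notes_content}"
--
--     # Strip all lines up front, then walk maximal runs of content/blank lines:
--     # a content run is copied whole, a blank run contributes one blank line (never first).
--     stripped = [line.strip() for line in notes_content.split('\n')]
--     result = []
--     i, n = 0, len(stripped)
--     while i < n:
--         j = i
--         while j < n and bool(stripped[j]) == bool(stripped[i]):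
--             j += 1
--         if stripped[i]:
--             result.extend(stripped[i:j])
--         elif result:
--             result.append('')
--         i = j
--     return '\n'.join(result)
-- ===== Notes on version B (the rewrite author's own statement) =====
-- stated objective: alternative
-- what changed: Replaces A's per-line scan that inspects the last appended element to decide whether a blank may be kept with a run-based traversal: lines are stripped up front and maximal runs of content/blank lines are consumed as blocks, a content run extending the result wholesale and a blank run contributing a single blank line unless the result is still empty.
import Mathlib
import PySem

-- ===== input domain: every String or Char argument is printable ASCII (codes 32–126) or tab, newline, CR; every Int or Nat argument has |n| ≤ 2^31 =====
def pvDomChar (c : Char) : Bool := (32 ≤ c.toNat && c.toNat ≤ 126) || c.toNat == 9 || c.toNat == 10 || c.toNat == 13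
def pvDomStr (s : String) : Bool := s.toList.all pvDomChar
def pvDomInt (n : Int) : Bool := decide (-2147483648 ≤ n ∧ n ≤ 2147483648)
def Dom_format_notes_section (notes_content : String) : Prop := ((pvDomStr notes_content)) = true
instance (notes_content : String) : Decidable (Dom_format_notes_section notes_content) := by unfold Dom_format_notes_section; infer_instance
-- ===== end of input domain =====

-- B replaces A's per-line scan (which tracks the last appended element) by a run-based
-- traversal over maximal content/blank runs of the pre-stripped lines; alternative, same cost.

-- ===== PORT A =====
-- the loop body: strip the line; keep it if non-empty, else keep one '' if the
-- result is non-empty and its last element is non-empty ('cleaned_lines and cleaned_lines[-1]')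
def pvStepA (acc : List (List Char)) (line : List Char) : List (List Char) :=
  let l := PySem.Chars.strip line
  if l ≠ [] then acc ++ [l]
  else if acc.getLast?.getD [] ≠ [] then acc ++ [[]]
  else acc

def format_notes_section (notes_content : String) : String :=
  if notes_content.toList = [] then ""
  else
    let cs := notes_content.toList
    let cs2 := if ¬ PySem.Chars.startswith (PySem.Chars.strip cs) "Notes".toList
               then "Notes\n".toList ++ cs else cs
    let lines := PySem.Chars.splitOn cs2 "\n".toList
    String.mk (PySem.Chars.join "\n".toList (lines.foldl pvStepA []))

-- ===== PORT B =====
-- the inner while loop: the run is the maximal prefix whose truthiness equals stripped[i]'s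
def pvKey (x y : List Char) : Bool := decide (y = []) == decide (x = [])

-- the outer while loop: cut the stripped lines into maximal same-truthiness runs
def pvGroups : List (List Char) → List (List (List Char))
  | [] => []
  | x :: xs =>
    (x :: xs.takeWhile (pvKey x)) :: pvGroups (xs.dropWhile (pvKey x))
termination_by s => s.length
decreasing_by
  exact Nat.lt_succ_of_le (List.length_dropWhile_le _ _)

-- the run body: extend with a content run; a blank run adds one '' if result non-empty
def pvStepB (res : List (List Char)) (run : List (List Char)) : List (List Char) :=
  if run.head?.getD [] ≠ [] then res ++ run
  else if res ≠ [] then res ++ [[]]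
  else res

def format_notes_section_alt (notes_content : String) : String :=
  if notes_content.toList = [] then ""
  else
    let cs := notes_content.toList
    let cs2 := if ¬ PySem.Chars.startswith (PySem.Chars.strip cs) "Notes".toList
               then "Notes\n".toList ++ cs else cs
    let stripped := (PySem.Chars.splitOn cs2 "\n".toList).map PySem.Chars.strip
    String.mk (PySem.Chars.join "\n".toList ((pvGroups stripped).foldl pvStepB []))

-- ===== PRECONDITION & SPEC =====
def Spec_format_notes_section (notes_content : String) (out : String) : Prop := out = format_notes_section_alt notes_content
instance (notes_content : String) (out : String) : Decidable (Spec_format_notes_section notes_content out) := by unfold Spec_format_notes_section; infer_instance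

-- ===== CLAIM (what is proved, stated in full; the proofs are below) =====
def Claim_equal_format_notes_section : Prop := ∀ (notes_content : String), Dom_format_notes_section notes_content → Spec_format_notes_section notes_content (format_notes_section notes_content)

-- ===== LEMMAS AND PROOFS =====

-- A's step on an already-stripped line
def pvStepA' (acc : List (List Char)) (l : List Char) : List (List Char) :=
  if l ≠ [] then acc ++ [l]
  else if acc.getLast?.getD [] ≠ [] then acc ++ [[]]
  else acc

theorem foldA_strip (ls : List (List Char)) (acc : List (List Char)) :
    ls.foldl pvStepA acc = (ls.map PySem.Chars.strip).foldl pvStepA' acc := by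
  rw [List.foldl_map]; rfl

theorem foldA_content (r : List (List Char)) (acc : List (List Char))
    (h : ∀ l ∈ r, l ≠ []) : r.foldl pvStepA' acc = acc ++ r := by
  induction r generalizing acc with
  | nil => simp
  | cons x xs ih =>
    have hx : x ≠ [] := h x (by simp)
    simp only [List.foldl_cons, pvStepA', if_pos hx]
    rw [ih _ (fun l hl => h l (by simp [hl]))]
    simp

theorem foldA_blank (r : List (List Char)) (acc : List (List Char))
    (h : ∀ l ∈ r, l = []) (ha : acc.getLast?.getD [] = []) :
    r.foldl pvStepA' acc = acc := by
  induction r with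
  | nil => rfl
  | cons x xs ih =>
    have hx : x = [] := h x (by simp)
    have : pvStepA' acc x = acc := by
      simp [pvStepA', hx, ha]
    rw [List.foldl_cons, this]
    exact ih (fun l hl => h l (by simp [hl]))

theorem head?_dropWhile_false {α : Type} (p : α → Bool) (l : List α) (a : α)
    (h : (l.dropWhile p).head? = some a) : p a = false := by
  induction l with
  | nil => simp at h
  | cons x xs ih =>
    by_cases hp : p x
    · rw [List.dropWhile_cons_of_pos hp] at h; exact ih h
    · rw [List.dropWhile_cons_of_neg hp] at h
      simp at h; subst h; simpa using hp

theorem main_aux (s acc : List (List Char))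
    (hinv : acc.getLast? = some [] → s.head? ≠ some []) :
    s.foldl pvStepA' acc = (pvGroups s).foldl pvStepB acc := by
  match s with
  | [] => rw [pvGroups]; rfl
  | x :: xs =>
    rw [pvGroups]
    have hsplit : x :: xs = (x :: xs.takeWhile (pvKey x)) ++ xs.dropWhile (pvKey x) := by
      simp [List.takeWhile_append_dropWhile]
    by_cases hx : x = []
    · -- blank run
      have hall : ∀ l ∈ x :: xs.takeWhile (pvKey x), l = [] := by
        intro l hl
        rcases List.mem_cons.1 hl with h | h
        · exact h ▸ hx
        · have := List.mem_takeWhile_imp h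
          simpa [pvKey, hx] using this
      have hrest : ((xs.dropWhile (pvKey x)).head? = some [] → False) := by
        intro h
        have := head?_dropWhile_false _ _ _ h
        simp [pvKey, hx] at this
      rcases List.eq_nil_or_concat' acc with rfl | ⟨bs, b, rfl⟩
      · -- acc = []
        have hA : (x :: xs.takeWhile (pvKey x)).foldl pvStepA' [] = [] :=
          foldA_blank _ _ hall (by simp)
        have hB : pvStepB [] (x :: xs.takeWhile (pvKey x)) = [] := by
          simp [pvStepB, hx]
        rw [hsplit, List.foldl_append, hA, List.foldl_cons, hB]
        exact main_aux _ [] (by simp)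
      · -- acc ends with b; invariant gives b ≠ []
        have hb : b ≠ [] := by
          intro hb0
          exact hinv (by simp [hb0]) (by simp [hx])
        have hlast : (bs ++ [b]).getLast?.getD [] = b := by simp
        have hA1 : pvStepA' (bs ++ [b]) x = (bs ++ [b]) ++ [[]] := by
          simp [pvStepA', hx, hb]
        have hA : (x :: xs.takeWhile (pvKey x)).foldl pvStepA' (bs ++ [b])
            = (bs ++ [b]) ++ [[]] := by
          rw [List.foldl_cons, hA1]
          exact foldA_blank _ _ (fun l hl => hall l (by simp [hl]))
            (by simp)
        have hB : pvStepB (bs ++ [b]) (x :: xs.takeWhile (pvKey x)) = (bs ++ [b]) ++ [[]] := by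
          simp [pvStepB, hx]
        rw [hsplit, List.foldl_append, hA, List.foldl_cons, hB]
        exact main_aux _ _ (by intro _ hh; exact hrest hh)
    · -- content run
      have hall : ∀ l ∈ x :: xs.takeWhile (pvKey x), l ≠ [] := by
        intro l hl
        rcases List.mem_cons.1 hl with h | h
        · exact h ▸ hx
        · have := List.mem_takeWhile_imp h
          simpa [pvKey, hx] using this
      have hA : (x :: xs.takeWhile (pvKey x)).foldl pvStepA' acc
          = acc ++ (x :: xs.takeWhile (pvKey x)) := foldA_content _ _ hall
      have hB : pvStepB acc (x :: xs.takeWhile (pvKey x)) = acc ++ (x :: xs.takeWhile (pvKey x)) := by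
        simp [pvStepB, hx]
      rw [hsplit, List.foldl_append, hA, List.foldl_cons, hB]
      refine main_aux _ _ ?_
      intro hlast
      exfalso
      have h1 : (acc ++ x :: xs.takeWhile (pvKey x)).getLast? = (x :: xs.takeWhile (pvKey x)).getLast? := by
        exact List.getLast?_append_of_ne_nil _ (List.cons_ne_nil _ _)
      rw [h1] at hlast
      have hmem : ([] : List Char) ∈ x :: xs.takeWhile (pvKey x) :=
        List.mem_of_getLast? hlast
      exact hall _ hmem rfl
termination_by s.length
decreasing_by
  all_goals exact Nat.lt_succ_of_le (List.length_dropWhile_le _ _)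

-- ===== VERDICT (by name: the statement is the Claim_ definition above) =====
theorem format_notes_section_spec : Claim_equal_format_notes_section := by
  intro notes_content _
  unfold Spec_format_notes_section format_notes_section format_notes_section_alt
  by_cases h0 : notes_content.toList = []
  · simp [h0]
  · simp only [h0, if_false]
    congr 2
    rw [foldA_strip]
    exact main_aux _ [] (by simp)
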